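-- pv_equiv track=rewrite | github.com/user999987/MY_NOTES | leetcodefake/String/H_undercorify_substring.py | insertUnderscore
-- ===== SOURCE A (Python) =====
-- def insertUnderscore(string, newLocations):
--     r = string[0:newLocations[0][0]]
--     i = 0
--     while i < len(newLocations) - 1:
--         pair = newLocations[i]
--         nextPair = newLocations[i + 1]
--         r = r + "_" + string[pair[0]:pair[1]] + "_"
--         r = r + string[pair[1]:nextPair[0]]
--         i += 1
--     pair = newLocations[-1]
--     r = r + "_" + string[pair[0]:pair[1]] + "_"
--     r = r + string[newLocations[-1][1]:]
--     return r
-- ===== SOURCE B (Python) =====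
-- def insertUnderscore(string, newLocations):
--     cuts = [0] + [x for pair in newLocations for x in (pair[0], pair[1])] + [None]
--     return "_".join(string[a:b] for a, b in zip(cuts, cuts[1:]))
-- ===== Notes on version B (the rewrite author's own statement) =====
-- stated objective: faster
-- what changed: Replaces A's cursor/look-ahead while loop with repeated string concatenation by a staged decomposition: flatten all pair boundaries into one cut-point list [0, s0, e0, ..., None], slice the string between consecutive cut points via zip, and join the pieces once with '_'.
import Mathlib
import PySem

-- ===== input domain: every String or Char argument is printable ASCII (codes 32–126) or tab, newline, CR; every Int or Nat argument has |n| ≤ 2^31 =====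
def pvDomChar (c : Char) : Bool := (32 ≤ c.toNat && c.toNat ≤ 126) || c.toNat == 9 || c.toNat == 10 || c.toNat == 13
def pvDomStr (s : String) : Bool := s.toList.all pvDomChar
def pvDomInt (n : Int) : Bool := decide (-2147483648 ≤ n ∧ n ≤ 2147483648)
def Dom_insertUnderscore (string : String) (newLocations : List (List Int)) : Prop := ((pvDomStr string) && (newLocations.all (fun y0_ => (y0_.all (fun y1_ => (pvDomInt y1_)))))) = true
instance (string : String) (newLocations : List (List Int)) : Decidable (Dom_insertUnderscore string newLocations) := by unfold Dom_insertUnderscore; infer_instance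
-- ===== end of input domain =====

-- B replaces A's cursor/look-ahead while loop (which grows the result by repeated string
-- concatenation) by a staged decomposition: flatten all pair boundaries into one cut-point
-- list, slice the string between consecutive cut points, and join the pieces with "_"
-- (objective: faster, by avoiding repeated concatenation).

-- ===== PORT A =====
-- A's while loop: state is the index i and the accumulated string r.
def pvALoop (string : String) (newLocations : List (List Int)) (i : Nat) (r : String) : String :=
  if _h : i < newLocations.length - 1 then
    let pair := PySem.List.pyGetD newLocations (i : Int) []
    let nextPair := PySem.List.pyGetD newLocations (((i + 1 : Nat)) : Int) []
    let r1 := r ++ "_" ++ PySem.Str.slice string (some (PySem.List.pyGetD pair 0 0)) (some (PySem.List.pyGetD pair 1 0)) ++ "_"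
    let r2 := r1 ++ PySem.Str.slice string (some (PySem.List.pyGetD pair 1 0)) (some (PySem.List.pyGetD nextPair 0 0))
    pvALoop string newLocations (i + 1) r2
  else r
termination_by newLocations.length - 1 - i

def insertUnderscore (string : String) (newLocations : List (List Int)) : String :=
  let r0 := PySem.Str.slice string (some 0) (some (PySem.List.pyGetD (PySem.List.pyGetD newLocations 0 []) 0 0))
  let r1 := pvALoop string newLocations 0 r0
  let pair := PySem.List.pyGetD newLocations (-1) []
  let r2 := r1 ++ "_" ++ PySem.Str.slice string (some (PySem.List.pyGetD pair 0 0)) (some (PySem.List.pyGetD pair 1 0)) ++ "_"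
  r2 ++ PySem.Str.slice string (some (PySem.List.pyGetD (PySem.List.pyGetD newLocations (-1) []) 1 0)) none

-- ===== PORT B =====
-- cuts = [0] + [x for pair in newLocations for x in (pair[0], pair[1])] + [None]
def pvCuts (newLocations : List (List Int)) : List (Option Int) :=
  [some 0] ++
  newLocations.flatMap (fun pair => [some (PySem.List.pyGetD pair 0 0), some (PySem.List.pyGetD pair 1 0)]) ++
  [none]

def insertUnderscore_alt (string : String) (newLocations : List (List Int)) : String :=
  let cuts := pvCuts newLocations
  let pieces := (cuts.zip (PySem.List.slice cuts (some 1) none)).map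
    (fun ab => PySem.Str.slice string ab.1 ab.2)
  PySem.Str.join "_" pieces

-- ===== PRECONDITION & SPEC =====
-- Pre_ excludes exactly the inputs where Python A raises IndexError: an empty list of
-- locations (newLocations[0] / newLocations[-1]) or a location with fewer than two entries
-- (pair[0] / pair[1]).
def Pre_insertUnderscore (string : String) (newLocations : List (List Int)) : Prop :=
  newLocations ≠ [] ∧ ∀ p ∈ newLocations, 2 ≤ p.length
instance (string : String) (newLocations : List (List Int)) : Decidable (Pre_insertUnderscore string newLocations) := by unfold Pre_insertUnderscore; infer_instance

def pvWitness_insertUnderscore : String × List (List Int) := ("hello world", [[1, 3], [5, 7]])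

def Spec_insertUnderscore (string : String) (newLocations : List (List Int)) (out : String) : Prop := out = insertUnderscore_alt string newLocations
instance (string : String) (newLocations : List (List Int)) (out : String) : Decidable (Spec_insertUnderscore string newLocations out) := by unfold Spec_insertUnderscore; infer_instance

-- ===== CLAIM (what is proved, stated in full; the proofs are below) =====
def Claim_equal_insertUnderscore : Prop := ∀ (string : String) (newLocations : List (List Int)), Dom_insertUnderscore string newLocations → Pre_insertUnderscore string newLocations → Spec_insertUnderscore string newLocations (insertUnderscore string newLocations)

-- ===== LEMMAS AND PROOFS =====

-- slice shorthand on char lists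
def pvSl (cs : List Char) (a b : Int) : List Char := PySem.List.slice cs (some a) (some b)

-- the loop body of A, between-pair slices included, from a given suffix of pairs (chars)
def pvInner (cs : List Char) : List (List Int) → List Char
  | [] => []
  | [_] => []
  | p :: q :: rest =>
      '_' :: (pvSl cs (PySem.List.pyGetD p 0 0) (PySem.List.pyGetD p 1 0) ++
      '_' :: (pvSl cs (PySem.List.pyGetD p 1 0) (PySem.List.pyGetD q 0 0) ++ pvInner cs (q :: rest)))

-- slices between consecutive cut points (chars)
def pvPieces (cs : List Char) : List (Option Int) → List (List Char)
  | [] => []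
  | [_] => []
  | a :: b :: t => PySem.List.slice cs a b :: pvPieces cs (b :: t)

-- the flattened boundary list of B
def pvFlat (l : List (List Int)) : List (Option Int) :=
  l.flatMap (fun pair => [some (PySem.List.pyGetD pair 0 0), some (PySem.List.pyGetD pair 1 0)])

lemma pvALoop_toList (string : String) (l : List (List Int)) :
    ∀ i r, (pvALoop string l i r).toList = r.toList ++ pvInner string.toList (l.drop i) := by
  suffices H : ∀ n i r, l.length - 1 - i = n →
      (pvALoop string l i r).toList = r.toList ++ pvInner string.toList (l.drop i) by
    intro i r; exact H _ i r rfl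
  intro n
  induction n with
  | zero =>
      intro i r hn
      rw [pvALoop]
      split_ifs with h
      · omega
      · have hlen : (l.drop i).length ≤ 1 := by simp; omega
        match hd : l.drop i with
        | [] => simp [pvInner]
        | [p] => simp [pvInner]
        | p :: q :: t => rw [hd] at hlen; simp at hlen
  | succ n ih =>
      intro i r hn
      rw [pvALoop]
      split_ifs with h
      · rw [ih (i + 1) _ (by omega)]
        have hi : i < l.length := by omega
        have hi1 : i + 1 < l.length := by omega
        rw [List.drop_eq_getElem_cons hi, List.drop_eq_getElem_cons hi1]
        have g0 : PySem.List.pyGetD l (i : Int) [] = l[i] := by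
          simp [PySem.List.pyGetD_natCast, List.getD_eq_getElem?_getD, hi]
        have g1 : PySem.List.pyGetD l (((i + 1 : Nat)) : Int) [] = l[i + 1] := by
          rw [PySem.List.pyGetD_natCast]
          simp [List.getD_eq_getElem?_getD, List.getElem?_eq_getElem hi1]
        rw [g0, g1]
        simp [pvInner, pvSl]
      · omega

lemma pvZip_pieces (cs : List Char) : ∀ cuts : List (Option Int),
    ((cuts.zip cuts.tail).map (fun ab => PySem.List.slice cs ab.1 ab.2)) = pvPieces cs cuts := by
  intro cuts
  induction cuts with
  | nil => rfl
  | cons a rest ih =>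
      cases rest with
      | nil => rfl
      | cons b t =>
          simp only [List.tail_cons, List.zip_cons_cons, List.map_cons, pvPieces]
          rw [← ih]
          rfl

lemma pvJoin_cons_ne (sep a : List Char) (l : List (List Char)) (h : l ≠ []) :
    PySem.Chars.join sep (a :: l) = a ++ sep ++ PySem.Chars.join sep l := by
  cases l with
  | nil => exact absurd rfl h
  | cons b t => rw [PySem.Chars.join_cons_cons]

lemma pvJoin_pieces (cs : List Char) :
    ∀ (l : List (List Int)) (h : l ≠ []) (prev : Int),
    PySem.Chars.join ['_'] (pvPieces cs (some prev :: (pvFlat l ++ [none])))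
      = pvSl cs prev (PySem.List.pyGetD l.headI 0 0) ++ pvInner cs l ++
        '_' :: (pvSl cs (PySem.List.pyGetD (l.getLast h) 0 0) (PySem.List.pyGetD (l.getLast h) 1 0) ++
        '_' :: PySem.List.slice cs (some (PySem.List.pyGetD (l.getLast h) 1 0)) none) := by
  intro l
  induction l with
  | nil => intro h; exact absurd rfl h
  | cons p rest ih =>
      intro _ prev
      cases rest with
      | nil =>
          simp only [pvFlat, List.flatMap_cons, List.flatMap_nil, List.append_nil, List.nil_append,
            List.cons_append, pvPieces, pvInner, List.getLast_singleton, List.headI]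
          rw [PySem.Chars.join_cons_cons, PySem.Chars.join_cons_cons, PySem.Chars.join_singleton]
          simp [pvSl]
      | cons q t =>
          have hne : q :: t ≠ [] := List.cons_ne_nil _ _
          have hflat : pvFlat (p :: q :: t)
              = some (PySem.List.pyGetD p 0 0) :: some (PySem.List.pyGetD p 1 0) :: pvFlat (q :: t) := by
            simp [pvFlat]
          rw [hflat]
          simp only [List.cons_append]
          have hp : pvPieces cs (some prev :: some (PySem.List.pyGetD p 0 0) :: some (PySem.List.pyGetD p 1 0) :: (pvFlat (q :: t) ++ [none]))
              = pvSl cs prev (PySem.List.pyGetD p 0 0) :: pvSl cs (PySem.List.pyGetD p 0 0) (PySem.List.pyGetD p 1 0) ::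
                pvPieces cs (some (PySem.List.pyGetD p 1 0) :: (pvFlat (q :: t) ++ [none])) := rfl
          have hne2 : pvPieces cs (some (PySem.List.pyGetD p 1 0) :: (pvFlat (q :: t) ++ [none])) ≠ [] := by
            simp only [pvFlat, List.flatMap_cons, List.cons_append, pvPieces]
            exact List.cons_ne_nil _ _
          rw [hp, pvJoin_cons_ne _ _ _ (List.cons_ne_nil _ _),
            pvJoin_cons_ne _ _ _ hne2]
          rw [ih hne (PySem.List.pyGetD p 1 0), List.getLast_cons hne]
          simp only [List.headI, pvInner]
          simp

-- ===== VERDICT (by name: the statement is the Claim_ definition above) =====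
theorem insertUnderscore_spec : Claim_equal_insertUnderscore := by
  intro string newLocations _dom pre
  obtain ⟨hne, -⟩ := pre
  unfold Spec_insertUnderscore
  refine String.toList_inj.mp ?_
  unfold insertUnderscore insertUnderscore_alt pvCuts
  have h0 : PySem.List.pyGetD newLocations 0 [] = newLocations.headI := by
    cases newLocations with
    | nil => exact absurd rfl hne
    | cons a t => simp [PySem.List.pyGetD_zero_cons, List.headI]
  simp only [String.toList_append]
  rw [pvALoop_toList]
  simp only [PySem.Str.toList_slice, PySem.Str.toList_join, List.drop_zero]
  rw [PySem.List.slice_from_one]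
  rw [show ([some (0:Int)] ++ newLocations.flatMap (fun pair => [some (PySem.List.pyGetD pair 0 0), some (PySem.List.pyGetD pair 1 0)]) ++ [none]) = some (0:Int) :: (pvFlat newLocations ++ [none]) from by simp [pvFlat]]
  rw [List.tail_cons]
  have hmap : List.map String.toList (List.map (fun ab => PySem.Str.slice string ab.1 ab.2)
        ((some (0:Int) :: (pvFlat newLocations ++ [none])).zip (pvFlat newLocations ++ [none])))
      = pvPieces string.toList (some (0:Int) :: (pvFlat newLocations ++ [none])) := by
    rw [← pvZip_pieces string.toList (some (0:Int) :: (pvFlat newLocations ++ [none]))]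
    simp [PySem.Str.toList_slice]
  rw [show (("_" : String).toList) = ['_'] from rfl, hmap]
  rw [pvJoin_pieces string.toList newLocations hne 0]
  have hlast : newLocations.getLast hne = PySem.List.pyGetD newLocations (-1) [] := by
    simp [PySem.List.pyGetD_neg_one, hne]
  rw [hlast, h0]
  simp [pvSl]
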